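-- pv_equiv track=rewrite | github.com/syseitz/predTED | predted/features.py | count_internal_loops
-- ===== SOURCE A (Python) =====
-- def count_internal_loops(structure: str) -> int:
--     n = len(structure)
--     internal_loops = 0
--     i = 0
--     while i < n - 1:
--         if structure[i] == ')' and structure[i + 1] == '.':
--             j = i + 1
--             while j < n and structure[j] == '.':
--                 j += 1
--             if j < n and structure[j] == '(':
--                 internal_loops += 1
--             i = j
--         else:
--             i += 1
--     return internal_loops
-- ===== SOURCE B (Python) =====
-- def count_internal_loops(structure: str) -> int:
--     # single forward pass: 3-state automaton (0 idle, 1 just saw ')', 2 in a dot-run after ')')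
--     state, count = 0, 0
--     for c in structure:
--         if c == '.':
--             state = 0 if state == 0 else 2
--         else:
--             if state == 2 and c == '(':
--                 count += 1
--             state = 1 if c == ')' else 0
--     return count
-- ===== Notes on version B (the rewrite author's own statement) =====
-- stated objective: simpler
-- what changed: Replaced A's index-walking outer while loop with a nested dot-run scan by a single forward pass over the characters driven by a 3-state automaton (idle / just saw ')' / in a dot-run after ')').
import Mathlib
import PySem

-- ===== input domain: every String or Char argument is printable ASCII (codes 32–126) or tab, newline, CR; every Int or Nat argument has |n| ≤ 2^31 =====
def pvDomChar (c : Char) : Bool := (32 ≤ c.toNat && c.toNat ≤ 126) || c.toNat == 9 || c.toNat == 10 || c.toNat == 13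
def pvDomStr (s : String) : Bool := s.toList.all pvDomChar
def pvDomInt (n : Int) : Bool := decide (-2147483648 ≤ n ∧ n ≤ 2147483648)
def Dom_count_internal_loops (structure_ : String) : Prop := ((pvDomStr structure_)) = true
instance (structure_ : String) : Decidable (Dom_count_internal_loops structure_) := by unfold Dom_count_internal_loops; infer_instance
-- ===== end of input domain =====

-- B replaces A's index-walking loop with nested dot-run scan by a single forward pass
-- driven by a 3-state automaton (objective: simpler; return value only, no mutation involved).

-- ===== PORT A =====
-- inner while loop: `while j < n and structure[j] == '.': j += 1`, returns the final j
def aJ (cs : List Char) (j : Nat) : Nat :=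
  if h : j < cs.length then
    if cs[j] = '.' then aJ cs (j + 1) else j
  else j
termination_by cs.length - j

-- needed by aLoop's termination proof
theorem aJ_ge (cs : List Char) (j : Nat) : j ≤ aJ cs j := by
  unfold aJ
  split
  · split
    · have := aJ_ge cs (j + 1); omega
    · omega
  · omega
termination_by cs.length - j

-- outer while loop of A, accumulator `internal_loops`
def aLoop (cs : List Char) (i : Nat) (acc : Int) : Int :=
  if h : i + 1 < cs.length then
    if cs[i]'(by omega) = ')' ∧ cs[i + 1]'h = '.' then
      let j := aJ cs (i + 1)
      let acc' := if hj : j < cs.length then (if cs[j] = '(' then acc + 1 else acc) else acc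
      aLoop cs j acc'
    else aLoop cs (i + 1) acc
  else acc
termination_by cs.length - i
decreasing_by
  · have := aJ_ge cs (i + 1); omega
  · omega

def count_internal_loops (structure_ : String) : Int := aLoop structure_.toList 0 0

-- ===== PORT B =====
-- one automaton step: state 0 = idle, 1 = just saw ')', 2 = in a dot-run after ')'
def bStep (p : Int × Int) (c : Char) : Int × Int :=
  if c = '.' then (if p.1 = 0 then 0 else 2, p.2)
  else (if c = ')' then 1 else 0, if p.1 = 2 ∧ c = '(' then p.2 + 1 else p.2)

def count_internal_loops_alt (structure_ : String) : Int :=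
  (structure_.toList.foldl bStep (0, 0)).2

-- ===== PRECONDITION & SPEC =====
def Spec_count_internal_loops (structure_ : String) (out : Int) : Prop := out = count_internal_loops_alt structure_
instance (structure_ : String) (out : Int) : Decidable (Spec_count_internal_loops structure_ out) := by unfold Spec_count_internal_loops; infer_instance

-- ===== CLAIM (what is proved, stated in full; the proofs are below) =====
def Claim_equal_count_internal_loops : Prop := ∀ (structure_ : String), Dom_count_internal_loops structure_ → Spec_count_internal_loops structure_ (count_internal_loops structure_)

-- ===== LEMMAS AND PROOFS =====

-- count of B's automaton started in state st
def g (st : Int) (l : List Char) : Int := (l.foldl bStep (st, 0)).2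

-- the accumulated count is a pure offset
theorem foldl_bStep_shift (l : List Char) (st a : Int) :
    l.foldl bStep (st, a) = ((l.foldl bStep (st, 0)).1, a + (l.foldl bStep (st, 0)).2) := by
  induction l generalizing st a with
  | nil => simp
  | cons c l ih =>
    simp only [List.foldl_cons]
    have hb : bStep (st, a) c = ((bStep (st, 0) c).1, a + (bStep (st, 0) c).2) := by
      simp [bStep]; split_ifs <;> simp
    rw [hb, ih ((bStep (st, 0) c).1) (a + (bStep (st, 0) c).2),
        ih ((bStep (st, 0) c).1) ((bStep (st, 0) c).2)]
    simp
    ring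

theorem g_cons (st : Int) (c : Char) (l : List Char) :
    g st (c :: l) = (bStep (st, 0) c).2 + g (bStep (st, 0) c).1 l := by
  simp only [g, List.foldl_cons]
  have : bStep (st, 0) c = ((bStep (st, 0) c).1, (bStep (st, 0) c).2) := rfl
  rw [this, foldl_bStep_shift]

theorem g_one_eq_zero (l : List Char) (h : l.head? ≠ some '.') : g 1 l = g 0 l := by
  cases l with
  | nil => rfl
  | cons c r =>
    have hc : c ≠ '.' := by simpa using h
    rw [g_cons, g_cons]
    simp [bStep, hc]

theorem g_singleton (st : Int) (c : Char) (h : st ≠ 2) : g st [c] = 0 := by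
  simp [g, bStep]; split_ifs <;> simp_all

theorem g_two_run (l : List Char) :
    g 2 l = (if (l.dropWhile (· = '.')).head? = some '(' then 1 else 0)
            + g 0 (l.dropWhile (· = '.')) := by
  induction l with
  | nil => simp [g]
  | cons c r ih =>
    by_cases hc : c = '.'
    · subst hc
      rw [g_cons]
      simpa [bStep, List.dropWhile] using ih
    · rw [List.dropWhile_cons_of_neg (by simpa using hc)]
      rw [g_cons, g_cons]
      simp only [bStep, if_neg hc]
      by_cases hp : c = '('
      · simp [hp]
      · simp [hp]

theorem g_zero_cons (c : Char) (l : List Char)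
    (h : ¬(c = ')' ∧ l.head? = some '.')) : g 0 (c :: l) = g 0 l := by
  rw [g_cons]
  by_cases hc : c = '.'
  · simp [bStep, hc]
  · by_cases hr : c = ')'
    · have : l.head? ≠ some '.' := by tauto
      simp [bStep, hr, g_one_eq_zero l this]
    · simp [bStep, hc, hr]

theorem drop_aJ (cs : List Char) (j : Nat) :
    cs.drop (aJ cs j) = (cs.drop j).dropWhile (· = '.') := by
  unfold aJ
  split
  · rename_i h
    rw [List.drop_eq_getElem_cons h]
    split
    · rename_i hd
      rw [List.dropWhile_cons_of_pos (by simpa using hd)]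
      exact drop_aJ cs (j + 1)
    · rename_i hd
      rw [List.dropWhile_cons_of_neg (by simpa using hd), ← List.drop_eq_getElem_cons h]
  · rename_i h
    rw [List.drop_eq_nil_of_le (by omega : cs.length ≤ j)]
    simp
termination_by cs.length - j

theorem aLoop_eq (cs : List Char) (i : Nat) (acc : Int) :
    aLoop cs i acc = acc + g 0 (cs.drop i) := by
  unfold aLoop
  split
  · rename_i h
    split
    · rename_i hpat
      have hj := aJ_ge cs (i + 1)
      rw [aLoop_eq cs (aJ cs (i + 1)) _]
      have hdropi : cs.drop i = cs[i]'(by omega) :: cs[i+1]'h :: cs.drop (i + 2) := by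
        rw [List.drop_eq_getElem_cons (by omega : i < cs.length),
            List.drop_eq_getElem_cons h]
      have hdj : cs.drop (aJ cs (i + 1)) = (cs.drop (i + 2)).dropWhile (· = '.') := by
        rw [drop_aJ, List.drop_eq_getElem_cons h,
            List.dropWhile_cons_of_pos (by simpa using hpat.2)]
      have hhead : (cs.drop (aJ cs (i + 1))).head? = cs[aJ cs (i + 1)]? :=
        List.head?_drop
      have hcnt : (if hj2 : aJ cs (i + 1) < cs.length then
            (if cs[aJ cs (i + 1)] = '(' then acc + 1 else acc) else acc)
          = acc + (if (cs.drop (aJ cs (i + 1))).head? = some '(' then 1 else 0) := by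
        rw [hhead]
        by_cases h2 : aJ cs (i + 1) < cs.length
        · rw [dif_pos h2, List.getElem?_eq_getElem h2]
          split_ifs with h3 h4 h5 <;> simp_all
        · rw [dif_neg h2, List.getElem?_eq_none (by omega)]
          simp
      have gp : ∀ l : List Char, g 0 (')' :: '.' :: l) = g 2 l := by
        intro l
        rw [g_cons, g_cons]
        have e1 : bStep (0, 0) ')' = ((1 : Int), (0 : Int)) := by decide
        have e2 : bStep (1, 0) '.' = ((2 : Int), (0 : Int)) := by decide
        simp [e1, e2]
      rw [hcnt, hdropi, hpat.1, hpat.2, gp, g_two_run, ← hdj, hhead]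
      ring
    · rename_i hpat
      rw [aLoop_eq cs (i + 1) acc]
      have hdropi : cs.drop i = cs[i]'(by omega) :: cs.drop (i + 1) := by
        rw [List.drop_eq_getElem_cons (by omega : i < cs.length)]
      rw [hdropi, g_zero_cons]
      rw [List.head?_drop, List.getElem?_eq_getElem h]
      intro ⟨h1, h2⟩
      exact hpat ⟨h1, by simpa using h2⟩
  · rename_i h
    by_cases hi : i < cs.length
    · have : cs.drop i = [cs[i]'hi] := by
        rw [List.drop_eq_getElem_cons hi, List.drop_eq_nil_of_le (by omega)]
      rw [this, g_singleton 0 _ (by norm_num)]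
      ring
    · rw [List.drop_eq_nil_of_le (by omega)]
      simp [g]
termination_by cs.length - i
decreasing_by
  · have := aJ_ge cs (i + 1); omega
  · omega

-- ===== VERDICT (by name: the statement is the Claim_ definition above) =====
theorem count_internal_loops_spec : Claim_equal_count_internal_loops := by
  intro s _
  show count_internal_loops s = count_internal_loops_alt s
  unfold count_internal_loops count_internal_loops_alt
  rw [aLoop_eq]
  simp [g]
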